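-- pv_equiv track=rewrite | github.com/ShinWooHyeon/algorithm | 프로그래머스/lv2/60058. 괄호 변환/괄호 변환.py | balance_index
-- ===== SOURCE A (Python) =====
-- def balance_index(p) :
--     count= 0 #왼쪽 괄호의 개수를 세야 한다
--     # 반대되는개수가 같아야할 때 두 개의 합을 0으로 만드는 개념도 좋다
--     for i in range(len((p))):
--         if p[i] =='(':
--             count += 1
--         else:
--             count -= 1
--         if count ==0:
--             return i
-- ===== SOURCE B (Python) =====
-- def balance_index(p):
--     # build the full running-balance table first, then search it
--     acc = []
--     t = 0
--     for c in p:
--         t += 1 if c == '(' else -1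
--         acc.append(t)
--     return next((i for i, v in enumerate(acc) if v == 0), None)
-- ===== Notes on version B (the rewrite author's own statement) =====
-- stated objective: alternative
-- what changed: Replaces the single early-exit counter loop by two passes: first build the complete running-balance table, then search it for the first zero with next()/enumerate.
-- outside the precondition, e.g. on balance_index('('): A returns None, B returns None
import Mathlib
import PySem

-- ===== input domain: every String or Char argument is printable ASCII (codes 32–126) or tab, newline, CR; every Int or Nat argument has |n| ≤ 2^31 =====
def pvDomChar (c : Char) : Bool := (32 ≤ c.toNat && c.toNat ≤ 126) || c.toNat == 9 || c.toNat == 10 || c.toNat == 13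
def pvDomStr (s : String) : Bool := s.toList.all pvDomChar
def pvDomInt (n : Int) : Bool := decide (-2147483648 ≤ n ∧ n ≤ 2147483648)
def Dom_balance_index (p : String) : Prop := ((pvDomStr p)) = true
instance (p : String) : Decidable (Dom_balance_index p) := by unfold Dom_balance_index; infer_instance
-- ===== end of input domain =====

-- B builds the full running-balance table and then searches it for the first zero (two passes), instead of A's single early-exit counter loop.
-- ===== PORT A =====
-- loop 'for i in range(len(p)): …' with early return; empty-suffix case is Python's fall-through return None (excluded by Pre_)
def pvGoA : List Char → Int → Int → Int
  | [], _, _ => -1  -- Python A returns None here: not an Int, excluded by Pre_balance_index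
  | c :: rest, i, count =>
      let count' := if c = '(' then count + 1 else count - 1
      if count' = 0 then i else pvGoA rest (i + 1) count'

def balance_index (p : String) : Int := pvGoA p.toList 0 0

-- ===== PORT B =====
-- pass 1: the running-balance table (the list 'acc' Source B appends to)
def pvAcc : List Char → Int → List Int
  | [], _ => []
  | c :: rest, t =>
      let t' := t + (if c = '(' then 1 else -1)
      t' :: pvAcc rest t'

-- pass 2: next((i for i,v in enumerate(acc) if v==0), None); the None default is excluded by Pre_balance_index
def pvFindZero : List Int → Int → Int
  | [], _ => -1
  | v :: rest, i => if v = 0 then i else pvFindZero rest (i + 1)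

def balance_index_alt (p : String) : Int := pvFindZero (pvAcc p.toList 0) 0

-- ===== PRECONDITION & SPEC =====
-- Pre_ excludes exactly the strings with no balanced prefix, on which Python A (and B) return None, not an int.
def Pre_balance_index (p : String) : Prop :=
  (List.range p.toList.length).any
    (fun k => 2 * (p.toList.take (k + 1)).count '(' == (p.toList.take (k + 1)).length) = true
instance (p : String) : Decidable (Pre_balance_index p) := by unfold Pre_balance_index; infer_instance
def pvWitness_balance_index : String := "()"
def Spec_balance_index (p : String) (out : Int) : Prop := out = balance_index_alt p
instance (p : String) (out : Int) : Decidable (Spec_balance_index p out) := by unfold Spec_balance_index; infer_instance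

-- ===== CLAIM (what is proved, stated in full; the proofs are below) =====
def Claim_equal_balance_index : Prop := ∀ (p : String), Dom_balance_index p → Pre_balance_index p → Spec_balance_index p (balance_index p)

-- ===== LEMMAS AND PROOFS =====

-- ===== VERDICT (by name: the statement is the Claim_ definition above) =====
theorem pv_go_eq (l : List Char) (i c : Int) : pvGoA l i c = pvFindZero (pvAcc l c) i := by
  induction l generalizing i c with
  | nil => rfl
  | cons x rest ih =>
      simp only [pvGoA, pvAcc, pvFindZero]
      have : (if x = '(' then c + 1 else c - 1) = c + (if x = '(' then 1 else -1) := by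
        split <;> ring
      rw [this]
      split <;> split <;> first | rfl | exact ih _ _

theorem balance_index_spec : Claim_equal_balance_index := by
  intro p _ _
  unfold Spec_balance_index balance_index balance_index_alt
  exact pv_go_eq _ _ _
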